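-- pv_equiv track=rewrite | github.com/thautwarm/BioInfoPlus | bioinfoplus/experiment/solver.py | generate_prospective
-- ===== SOURCE A (Python) =====
-- from itertools import product
--
-- def generate_prospective(seq, species):
--     undecided = [i for i, each in enumerate(seq) if each is None]
--     prospectives = product(*[range(species) for _ in range(len(undecided))])
--     for prospective in prospectives:
--         solu = list(seq)
--         for i, loc in enumerate(undecided):
--             solu[loc] = prospective[i]
--         yield solu
-- ===== SOURCE B (Python) =====
-- def generate_prospective(seq, species):
--     base = list(seq)
--     undecided = [i for i, x in enumerate(seq) if x is None]
--
--     def helper(j):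
--         if j == len(undecided):
--             yield base[:]
--         else:
--             for v in range(species):
--                 base[undecided[j]] = v
--                 yield from helper(j + 1)
--
--     yield from helper(0)
-- ===== Notes on version B (the rewrite author's own statement) =====
-- stated objective: alternative
-- what changed: replaces the materialised itertools.product of ranges plus a per-tuple enumerate/assignment loop with a direct recursive backtracking generator that fills one undecided position per level, mutating a shared base and copying it at the leaves
import Mathlib
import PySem

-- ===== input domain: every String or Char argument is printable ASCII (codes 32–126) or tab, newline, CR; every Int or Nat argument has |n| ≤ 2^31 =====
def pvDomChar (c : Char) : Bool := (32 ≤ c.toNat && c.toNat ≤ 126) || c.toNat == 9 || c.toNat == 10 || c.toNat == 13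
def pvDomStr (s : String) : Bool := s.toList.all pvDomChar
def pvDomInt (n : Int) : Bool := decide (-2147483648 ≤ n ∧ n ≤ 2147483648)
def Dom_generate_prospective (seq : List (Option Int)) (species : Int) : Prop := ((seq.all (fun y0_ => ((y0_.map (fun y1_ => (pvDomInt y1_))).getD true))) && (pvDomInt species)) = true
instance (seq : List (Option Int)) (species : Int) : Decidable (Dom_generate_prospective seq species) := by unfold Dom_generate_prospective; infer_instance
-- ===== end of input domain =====

-- B replaces the materialised product-of-ranges + per-tuple assignment loop with a
-- recursive backtracking enumeration filling one undecided position per level (alternative decomposition).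
-- (Both Pythons are generators; the ports collect the yielded lists in order.)


-- ===== PORT A =====
-- itertools.product(*lists): first factor varies slowest
def pvProd : List (List Int) → List (List Int)
  | [] => [[]]
  | l :: ls => l.flatMap (fun x => (pvProd ls).map (fun r => x :: r))

-- 'for i, loc in enumerate(undecided): solu[loc] = prospective[i]' as the obvious
-- structural recursion consuming the index list and the tuple in step
def pvApplyFill (solu : List (Option Int)) : List Int → List Int → List (Option Int)
  | [], _ => solu
  | loc :: locs, t => pvApplyFill (solu.set loc.toNat (some (t.headD 0))) locs t.tail

def generate_prospective (seq : List (Option Int)) (species : Int) : List (List Int) :=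
  let undecided : List Int :=
    (PySem.List.enumerate seq).filterMap (fun p => if p.2 = none then some p.1 else none)
  let prospectives := pvProd (List.replicate undecided.length (PySem.List.pyRange 0 species 1))
  prospectives.map (fun prospective =>
    -- yielded solu: every None slot was overwritten, the getD 0 only resolves the type
    (pvApplyFill seq undecided prospective).map (fun x => x.getD 0))

-- ===== PORT B =====
-- helper(j): mutate base at undecided[j] for each v in range(species) and recurse;
-- ported functionally by passing the base along and recursing on the tail of undecided
def pvFillRec (base : List (Option Int)) (species : Int) : List Int → List (List Int)
  | [] => [base.map (fun x => x.getD 0)]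
  | j :: rest =>
      (PySem.List.pyRange 0 species 1).flatMap
        (fun v => pvFillRec (base.set j.toNat (some v)) species rest)

def generate_prospective_alt (seq : List (Option Int)) (species : Int) : List (List Int) :=
  let undecided : List Int :=
    (PySem.List.enumerate seq).filterMap (fun p => if p.2 = none then some p.1 else none)
  pvFillRec seq species undecided

-- ===== PRECONDITION & SPEC =====
def Spec_generate_prospective (seq : List (Option Int)) (species : Int) (out : List (List Int)) : Prop := out = generate_prospective_alt seq species
instance (seq : List (Option Int)) (species : Int) (out : List (List Int)) : Decidable (Spec_generate_prospective seq species out) := by unfold Spec_generate_prospective; infer_instance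

-- ===== CLAIM (what is proved, stated in full; the proofs are below) =====
def Claim_equal_generate_prospective : Prop := ∀ (seq : List (Option Int)) (species : Int), Dom_generate_prospective seq species → Spec_generate_prospective seq species (generate_prospective seq species)

-- ===== LEMMAS AND PROOFS =====

theorem pvProd_fill_eq_fillRec (species : Int) (us : List Int) :
    ∀ base : List (Option Int),
      (pvProd (List.replicate us.length (PySem.List.pyRange 0 species 1))).map
          (fun t => (pvApplyFill base us t).map (fun x => x.getD 0))
        = pvFillRec base species us := by
  induction us with
  | nil =>
      intro base
      simp [pvProd, pvApplyFill, pvFillRec]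
  | cons u us ih =>
      intro base
      simp only [List.length_cons, List.replicate_succ, pvProd, pvFillRec,
        List.map_flatMap]
      refine List.flatMap_congr ?_
      intro v _
      simpa [pvApplyFill] using ih (base.set u.toNat (some v))

-- ===== VERDICT (by name: the statement is the Claim_ definition above) =====
theorem generate_prospective_spec : Claim_equal_generate_prospective := by
  intro seq species _
  unfold Spec_generate_prospective generate_prospective generate_prospective_alt
  exact pvProd_fill_eq_fillRec species _ seq
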